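-- pv_equiv track=rewrite | github.com/superadm1n/CiscoAutomationFramework | CiscoAutomationFramework/Parsers/RoutingTableParser.py | _parse_out_header_ios
-- ===== SOURCE A (Python) =====
-- def _parse_out_header_ios(data):
--     return_data = []
--     flag = False
--     for line in data:
--         if 'gateway' in line.lower():
--             flag = True
--             continue
--         if flag is True:
--             return_data.append(line)
--     return return_data
-- ===== SOURCE B (Python) =====
-- def _parse_out_header_ios(data):
--     idx = next((i for i, line in enumerate(data) if 'gateway' in line.lower()), None)
--     if idx is None:
--         return []
--     return [line for line in data[idx + 1:] if 'gateway' not in line.lower()]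
-- ===== Notes on version B (the rewrite author's own statement) =====
-- stated objective: idiomatic
-- what changed: Replaces the stateful boolean-flag accumulation loop by locating the first 'gateway' header line with enumerate/next and returning a filtered slice of the tail.
import Mathlib
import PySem

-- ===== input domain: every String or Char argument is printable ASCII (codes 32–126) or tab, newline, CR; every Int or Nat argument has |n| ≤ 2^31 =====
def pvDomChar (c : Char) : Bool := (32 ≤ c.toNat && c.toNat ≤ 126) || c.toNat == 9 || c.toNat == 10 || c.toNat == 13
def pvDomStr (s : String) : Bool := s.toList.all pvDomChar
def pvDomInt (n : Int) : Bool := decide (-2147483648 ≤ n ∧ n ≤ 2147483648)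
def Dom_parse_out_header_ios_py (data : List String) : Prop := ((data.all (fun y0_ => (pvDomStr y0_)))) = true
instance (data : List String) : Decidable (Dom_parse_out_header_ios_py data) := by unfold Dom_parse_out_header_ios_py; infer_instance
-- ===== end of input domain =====

-- B replaces A's boolean-flag scan by locating the first 'gateway' line and filtering the tail slice; same values, no speed claim.
-- ===== PORT A =====
def parse_out_header_ios_py (data : List String) : List String :=
  (data.foldl (fun (st : List String × Bool) line =>
      if PySem.Str.isIn "gateway" (PySem.Str.lower line) then (st.1, true)
      else if st.2 = true then (st.1 ++ [line], st.2) else st)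
    ([], false)).1

-- ===== PORT B =====
def parse_out_header_ios_py_alt (data : List String) : List String :=
  match data.findIdx? (fun line => PySem.Str.isIn "gateway" (PySem.Str.lower line)) with
  | none => []
  | some i => (data.drop (i + 1)).filter (fun line => !(PySem.Str.isIn "gateway" (PySem.Str.lower line)))

-- ===== PRECONDITION & SPEC =====
def Spec_parse_out_header_ios_py (data : List String) (out : List String) : Prop := out = parse_out_header_ios_py_alt data
instance (data : List String) (out : List String) : Decidable (Spec_parse_out_header_ios_py data out) := by unfold Spec_parse_out_header_ios_py; infer_instance

-- ===== CLAIM (what is proved, stated in full; the proofs are below) =====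
def Claim_equal_parse_out_header_ios_py : Prop := ∀ (data : List String), Dom_parse_out_header_ios_py data → Spec_parse_out_header_ios_py data (parse_out_header_ios_py data)

-- ===== LEMMAS AND PROOFS =====

-- ===== VERDICT (by name: the statement is the Claim_ definition above) =====
theorem gw_loop_flag_true (data : List String) (acc : List String) :
    (data.foldl (fun (st : List String × Bool) line =>
        if PySem.Str.isIn "gateway" (PySem.Str.lower line) then (st.1, true)
        else if st.2 = true then (st.1 ++ [line], st.2) else st)
      (acc, true)).1
    = acc ++ data.filter (fun line => !(PySem.Str.isIn "gateway" (PySem.Str.lower line))) := by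
  induction data generalizing acc with
  | nil => simp
  | cons x xs ih =>
    by_cases h : PySem.Str.isIn "gateway" (PySem.Str.lower x) = true <;>
      simp_all

theorem gw_loop_flag_false (data : List String) (acc : List String) :
    (data.foldl (fun (st : List String × Bool) line =>
        if PySem.Str.isIn "gateway" (PySem.Str.lower line) then (st.1, true)
        else if st.2 = true then (st.1 ++ [line], st.2) else st)
      (acc, false)).1
    = acc ++ (match data.findIdx? (fun line => PySem.Str.isIn "gateway" (PySem.Str.lower line)) with
      | none => []
      | some i => (data.drop (i + 1)).filter (fun line => !(PySem.Str.isIn "gateway" (PySem.Str.lower line)))) := by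
  induction data generalizing acc with
  | nil => simp
  | cons x xs ih =>
    by_cases h : PySem.Str.isIn "gateway" (PySem.Str.lower x) = true
    · simp only [List.foldl_cons, List.findIdx?_cons, if_pos h, List.drop_succ_cons,
        List.drop_zero]
      simpa using gw_loop_flag_true xs acc
    · simp only [List.foldl_cons, List.findIdx?_cons, if_neg h, Bool.false_eq_true,
        if_false, ih]
      cases hf : xs.findIdx? (fun line => PySem.Str.isIn "gateway" (PySem.Str.lower line)) with
      | none => simp
      | some i => simp [List.drop_succ_cons]

-- ===== VERDICT =====
theorem parse_out_header_ios_py_spec : Claim_equal_parse_out_header_ios_py := by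
  intro data _
  unfold Spec_parse_out_header_ios_py parse_out_header_ios_py parse_out_header_ios_py_alt
  simpa using gw_loop_flag_false data []
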